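-- pv_equiv track=rewrite | github.com/teej/kevin | src/kevin/models/expansion.py | _find_matching_file
-- ===== SOURCE A (Python) =====
-- from typing import Dict, List, Optional, Tuple
--
-- def _find_matching_file(file_reference: str, available_files: List[str]) -> Optional[str]:
--     """Find the best matching file for a given reference."""
--     file_reference = file_reference.strip("\"'")
--
--     # Exact match
--     if file_reference in available_files:
--         return file_reference
--
--     # Filename match (without path)
--     filename = file_reference.split("/")[-1]
--     for file_path in available_files:
--         if file_path.endswith(filename):
--             return file_path
--
--     # Partial match (more strict)
--     for file_path in available_files:
--         if (
--             file_reference.lower() in file_path.lower() and len(file_reference) > 3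
--         ):  # Avoid matching very short strings
--             return file_path
--
--     # Extension match (only if filename part matches)
--     if "." in file_reference:
--         ext = file_reference.split(".")[-1]
--         filename_part = file_reference.split(".")[0]
--         for file_path in available_files:
--             if file_path.endswith(f".{ext}") and filename_part in file_path.split("/")[-1]:
--                 return file_path
--
--     # No match found
--     return None
-- ===== SOURCE B (Python) =====
-- def _find_matching_file(file_reference, available_files):
--     """Single pass over available_files maintaining four first-match slots."""
--     ref = file_reference.strip("\"'")
--     filename = ref.split("/")[-1]
--     ref_lower = ref.lower()
--     long_enough = len(ref) > 3
--     has_dot = "." in ref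
--     if has_dot:
--         parts = ref.split(".")
--         ext_suffix = "." + parts[-1]
--         filename_part = parts[0]
--     else:
--         ext_suffix = filename_part = ""
--     exact = fname = partial = extm = None
--     for fp in available_files:
--         if exact is None and fp == ref:
--             exact = fp
--         if fname is None and fp.endswith(filename):
--             fname = fp
--         if partial is None and long_enough and ref_lower in fp.lower():
--             partial = fp
--         if has_dot and extm is None and fp.endswith(ext_suffix) and filename_part in fp.split("/")[-1]:
--             extm = fp
--     if exact is not None:
--         return ref
--     for r in (fname, partial, extm):
--         if r is not None:
--             return r
--     return None
-- ===== Notes on version B (the rewrite author's own statement) =====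
-- stated objective: alternative
-- what changed: A's four sequential scans of available_files (membership test plus three for-loops) are replaced by a single pass that precomputes the reference-derived data once and maintains four first-match slots (exact, filename-suffix, partial, extension), combined after the loop.
import Mathlib
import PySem

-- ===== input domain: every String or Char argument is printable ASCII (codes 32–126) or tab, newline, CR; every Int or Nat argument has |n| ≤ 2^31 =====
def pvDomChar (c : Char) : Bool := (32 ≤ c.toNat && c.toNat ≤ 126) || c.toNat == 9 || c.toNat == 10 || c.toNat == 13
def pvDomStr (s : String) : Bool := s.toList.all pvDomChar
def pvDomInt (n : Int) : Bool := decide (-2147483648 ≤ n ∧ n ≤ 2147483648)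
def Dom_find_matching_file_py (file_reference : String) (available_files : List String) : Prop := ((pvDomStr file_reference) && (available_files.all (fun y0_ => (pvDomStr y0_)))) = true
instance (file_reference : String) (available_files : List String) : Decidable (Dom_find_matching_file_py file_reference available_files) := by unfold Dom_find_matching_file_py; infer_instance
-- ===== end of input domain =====

-- B replaces A's four sequential scans of available_files by ONE pass keeping four
-- first-match slots (exact / filename-suffix / partial / extension), combined afterwards.

-- ===== PORT A =====
-- A's 2nd for-loop: first file_path with file_path.endswith(filename)
def fmfA_fnameLoop (filename : String) : List String → Option String
  | [] => none
  | fp :: rest => if PySem.Str.endswith fp filename then some fp else fmfA_fnameLoop filename rest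

-- A's 3rd for-loop: first file_path with ref.lower() in fp.lower() and len(ref) > 3
def fmfA_partialLoop (ref : String) : List String → Option String
  | [] => none
  | fp :: rest =>
    if PySem.Str.isIn (PySem.Str.lower ref) (PySem.Str.lower fp) && decide (3 < PySem.Str.len ref)
    then some fp else fmfA_partialLoop ref rest

-- A's 4th for-loop: first file_path ending in "."+ext whose basename contains filename_part
def fmfA_extLoop (ext filename_part : String) : List String → Option String
  | [] => none
  | fp :: rest =>
    if PySem.Str.endswith fp ("." ++ ext)
        && PySem.Str.isIn filename_part (((PySem.Str.split? fp "/").getD []).getLast?.getD "")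
    then some fp else fmfA_extLoop ext filename_part rest

def find_matching_file_py (file_reference : String) (available_files : List String) : Option String :=
  let ref := PySem.Str.stripChars file_reference "\"'"
  if available_files.contains ref then some ref
  else
    -- str.split with a nonempty separator always yields `some` of a nonempty list,
    -- so the .getD fallbacks are never hit
    let filename := ((PySem.Str.split? ref "/").getD []).getLast?.getD ""
    match fmfA_fnameLoop filename available_files with
    | some fp => some fp
    | none =>
      match fmfA_partialLoop ref available_files with
      | some fp => some fp
      | none =>
        if PySem.Str.isIn "." ref then
          let parts := (PySem.Str.split? ref ".").getD []
          fmfA_extLoop (parts.getLast?.getD "") (parts.head?.getD "") available_files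
        else none

-- ===== PORT B =====
-- one step of B's single pass: fill each still-empty slot whose rule fires
def fmfB_step (ref filename refLower : String) (longEnough hasDot : Bool)
    (extSuffix filenamePart : String)
    (st : Option String × Option String × Option String × Option String) (fp : String) :
    Option String × Option String × Option String × Option String :=
  let e := if st.1.isNone && (fp == ref) then some fp else st.1
  let f := if st.2.1.isNone && PySem.Str.endswith fp filename then some fp else st.2.1
  let p := if st.2.2.1.isNone && longEnough && PySem.Str.isIn refLower (PySem.Str.lower fp)
           then some fp else st.2.2.1
  let x := if hasDot && st.2.2.2.isNone && PySem.Str.endswith fp extSuffix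
              && PySem.Str.isIn filenamePart (((PySem.Str.split? fp "/").getD []).getLast?.getD "")
           then some fp else st.2.2.2
  (e, f, p, x)

def find_matching_file_py_alt (file_reference : String) (available_files : List String) : Option String :=
  let ref := PySem.Str.stripChars file_reference "\"'"
  let filename := ((PySem.Str.split? ref "/").getD []).getLast?.getD ""
  let refLower := PySem.Str.lower ref
  let longEnough : Bool := decide (3 < PySem.Str.len ref)
  let hasDot := PySem.Str.isIn "." ref
  let parts := (PySem.Str.split? ref ".").getD []
  let extSuffix := if hasDot then "." ++ (parts.getLast?.getD "") else ""
  let filenamePart := if hasDot then parts.head?.getD "" else ""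
  let st := available_files.foldl
    (fmfB_step ref filename refLower longEnough hasDot extSuffix filenamePart)
    (none, none, none, none)
  match st.1 with
  | some _ => some ref
  | none =>
    match st.2.1 with
    | some r => some r
    | none =>
      match st.2.2.1 with
      | some r => some r
      | none => st.2.2.2

-- ===== PRECONDITION & SPEC =====
def Spec_find_matching_file_py (file_reference : String) (available_files : List String) (out : Option String) : Prop := out = find_matching_file_py_alt file_reference available_files
instance (file_reference : String) (available_files : List String) (out : Option String) : Decidable (Spec_find_matching_file_py file_reference available_files out) := by unfold Spec_find_matching_file_py; infer_instance

-- ===== CLAIM (what is proved, stated in full; the proofs are below) =====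
def Claim_equal_find_matching_file_py : Prop := ∀ (file_reference : String) (available_files : List String), Dom_find_matching_file_py file_reference available_files → Spec_find_matching_file_py file_reference available_files (find_matching_file_py file_reference available_files)

-- ===== LEMMAS AND PROOFS =====

-- a slot keeps its value once set, otherwise becomes the first match
def fmfSlot (s : Option String) (q : String → Bool) (l : List String) : Option String :=
  match s with
  | some v => some v
  | none => l.find? q

theorem fmfSlot_none (q : String → Bool) (l : List String) : fmfSlot none q l = l.find? q := rfl

theorem fmfSlot_cons (s : Option String) (q : String → Bool) (fp : String) (l : List String)
    (c : Bool) (hc : c = (s.isNone && q fp)) :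
    fmfSlot (if c then some fp else s) q l = fmfSlot s q (fp :: l) := by
  subst hc
  cases s with
  | some v => simp [fmfSlot]
  | none => cases h : q fp <;> simp [fmfSlot, List.find?_cons, h]

-- B's fold computes the four first-matches
theorem fmfB_fold (ref filename refLower : String) (longEnough hasDot : Bool)
    (extSuffix filenamePart : String) (l : List String)
    (e f p x : Option String) :
    l.foldl (fmfB_step ref filename refLower longEnough hasDot extSuffix filenamePart) (e, f, p, x)
      = (fmfSlot e (fun fp => fp == ref) l,
         fmfSlot f (fun fp => PySem.Str.endswith fp filename) l,
         fmfSlot p (fun fp => PySem.Str.isIn refLower (PySem.Str.lower fp) && longEnough) l,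
         fmfSlot x (fun fp => hasDot && PySem.Str.endswith fp extSuffix
            && PySem.Str.isIn filenamePart (((PySem.Str.split? fp "/").getD []).getLast?.getD "")) l) := by
  induction l generalizing e f p x with
  | nil => cases e <;> cases f <;> cases p <;> cases x <;> simp [fmfSlot]
  | cons fp rest ih =>
    rw [List.foldl_cons]
    simp only [fmfB_step]
    rw [ih]
    refine congrArg₂ _ ?_ (congrArg₂ _ ?_ (congrArg₂ _ ?_ ?_))
    · exact fmfSlot_cons e _ fp rest _ rfl
    · exact fmfSlot_cons f _ fp rest _ rfl
    · exact fmfSlot_cons p _ fp rest _ (by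
        cases p <;> simp [Bool.and_assoc, Bool.and_comm, Bool.and_left_comm])
    · exact fmfSlot_cons x _ fp rest _ (by
        cases x <;> simp [Bool.and_assoc, Bool.and_comm, Bool.and_left_comm])

-- A's three loops are first-match searches
theorem fmfA_fnameLoop_eq (filename : String) (l : List String) :
    fmfA_fnameLoop filename l = l.find? (fun fp => PySem.Str.endswith fp filename) := by
  induction l with
  | nil => rfl
  | cons fp rest ih =>
    cases h : PySem.Chars.endswith fp.toList filename.toList <;>
      simp [fmfA_fnameLoop, List.find?_cons, h, ih]

theorem fmfA_partialLoop_eq (ref : String) (l : List String) :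
    fmfA_partialLoop ref l
      = l.find? (fun fp => PySem.Str.isIn (PySem.Str.lower ref) (PySem.Str.lower fp)
          && decide (3 < PySem.Str.len ref)) := by
  induction l with
  | nil => rfl
  | cons fp rest ih =>
    by_cases h1 : PySem.Chars.isIn (PySem.Chars.lower ref.toList) (PySem.Chars.lower fp.toList) = true <;>
      by_cases h2 : 3 < ref.length <;>
        simp [fmfA_partialLoop, List.find?_cons, h1, h2, ih]

theorem fmfA_extLoop_eq (ext filename_part : String) (l : List String) :
    fmfA_extLoop ext filename_part l
      = l.find? (fun fp => PySem.Str.endswith fp ("." ++ ext)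
          && PySem.Str.isIn filename_part (((PySem.Str.split? fp "/").getD []).getLast?.getD "")) := by
  induction l with
  | nil => rfl
  | cons fp rest ih =>
    by_cases h1 : PySem.Chars.endswith fp.toList ('.' :: ext.toList) = true <;>
      by_cases h2 : PySem.Chars.isIn filename_part.toList
          (((PySem.Str.split? fp "/").getD []).getLast?.getD "").toList = true <;>
        simp [fmfA_extLoop, List.find?_cons, h1, h2, ih]

theorem find?_beq (ref : String) (l : List String) :
    l.find? (fun fp => fp == ref) = if l.contains ref then some ref else none := by
  induction l with
  | nil => rfl
  | cons fp rest ih =>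
    by_cases h : fp = ref
    · subst h; simp [List.find?_cons]
    · have h' : (fp == ref) = false := by simp [h]
      have h'' : (ref == fp) = false := by simp [Ne.symm h]
      simp [List.find?_cons, h', h'', ih, h, Ne.symm h]

theorem find?_false (l : List String) : l.find? (fun _ => false) = none := by
  simp [List.find?_eq_none]

-- ===== VERDICT (by name: the statement is the Claim_ definition above) =====
theorem find_matching_file_py_spec : Claim_equal_find_matching_file_py := by
  intro file_reference available_files _
  unfold Spec_find_matching_file_py find_matching_file_py find_matching_file_py_alt
  simp only [fmfB_fold, fmfSlot_none, fmfA_fnameLoop_eq, fmfA_partialLoop_eq, fmfA_extLoop_eq,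
    find?_beq]
  by_cases hc : PySem.Str.stripChars file_reference "\"'" ∈ available_files
  · simp [hc]
  · by_cases hd : PySem.Chars.isIn ['.'] (PySem.Chars.stripChars file_reference.toList ['\"', '\'']) = true
    · simp [hc, hd]
    · simp only [Bool.not_eq_true] at hd
      simp [hc, hd, find?_false]
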